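-- pv_equiv track=rewrite | github.com/Lisan-al-Gaib/Alien-Alphabet-Generator | char_gen_3.py | permy
-- ===== SOURCE A (Python) =====
-- import os, copy, pprint, random
--
-- def permy(iterable):
--     # probably trim this down to size!
--     pool = list(iterable)
--     n = len(pool)
--     r = 2
--     if r > n:
--         return
--     indices = list(range(n)) # i
--     cycles = list(range(n,n-r, -1))
--
--     yield list(copy.deepcopy(pool[i]) for i in indices[:r])
--     ########################
--     while n:
--         for i in reversed(range(r)):
--             cycles[i] -= 1
--             if cycles[i] == 0:
--                 indices[i:] = indices[i+1:] + indices[i:i+1]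
--                 cycles[i] = n - i
--             else:
--                 j = cycles[i]
--                 indices[i], indices[-j] = indices[-j], indices[i]
--                 yield list(copy.deepcopy(pool[i]) for i in indices[:r])
--                 break
--         else:
--             return
-- ===== SOURCE B (Python) =====
-- import copy
--
-- def permy(iterable):
--     # Plain nested index scan: outer index i ascending, inner index j ascending
--     # skipping j == i; same lexicographic order as the cycle-state machine in A.
--     pool = list(iterable)
--     n = len(pool)
--     for i in range(n):
--         for j in range(n):
--             if i != j:
--                 yield [copy.deepcopy(pool[i]), copy.deepcopy(pool[j])]
-- ===== Notes on version B (the rewrite author's own statement) =====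
-- stated objective: simpler
-- what changed: Replaces itertools-style permutation state machine (indices/cycles arrays with in-place rotations and swaps) by a plain double index loop that skips i == j; n < 2 yields nothing with no special case.
import Mathlib
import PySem

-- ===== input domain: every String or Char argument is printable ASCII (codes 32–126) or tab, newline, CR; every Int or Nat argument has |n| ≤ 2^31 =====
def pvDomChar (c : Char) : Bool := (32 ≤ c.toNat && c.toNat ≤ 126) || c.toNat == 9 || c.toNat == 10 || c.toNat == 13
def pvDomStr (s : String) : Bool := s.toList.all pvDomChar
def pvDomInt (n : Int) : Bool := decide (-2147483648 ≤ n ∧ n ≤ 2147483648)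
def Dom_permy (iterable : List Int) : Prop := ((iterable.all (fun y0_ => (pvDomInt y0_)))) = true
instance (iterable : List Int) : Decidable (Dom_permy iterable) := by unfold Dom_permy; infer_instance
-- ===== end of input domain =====

-- B replaces A's itertools-style indices/cycles permutation state machine by a plain
-- double index loop that skips i == j (objective: simpler).  A is a generator; both
-- ports return the list of yielded values; deepcopy of an int is the int itself.

-- ===== PORT A =====
-- 'yield list(copy.deepcopy(pool[i]) for i in indices[:r])' with r = 2; on every
-- reachable state the first two indices are in-range positions of pool, so getD is
-- exact for pool[i].
def permyYield (pool : List Int) (indices : List Nat) : List Int :=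
  (indices.take 2).map (fun i => pool.getD i 0)


-- The 'while n:' loop (n ≥ 2 here, so the condition is always true; the loop exits via
-- the for-else 'return').  The inner 'for i in reversed(range(r))' with the literal
-- r = 2 is transliterated as its two iterations, i = 1 then i = 0, each the exact
-- Python statements in order.  Python's list positions and the cycles values are
-- nonnegative integers on every reachable state, so Nat arithmetic is exact;
-- indices[-j] is the negative index -j, i.e. position n - j (1 ≤ j ≤ n - 1 on
-- reachable states); the simultaneous swap 'indices[i], indices[-j] = indices[-j],
-- indices[i]' reads both cells first and then writes them.  Every loop iteration
-- either yields one pair or returns, so fuel n*n (> the n*(n-1) yields) makes the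
-- recursion total without changing any computed value.
def permyLoop (pool : List Int) (n : Nat) (indices : List Nat) (c0 c1 : Nat) :
    Nat → List (List Int)
  | 0 => []
  | fuel + 1 =>
    let c1' := c1 - 1
    if c1' = 0 then
      let indices := indices.take 1 ++ (indices.drop 2 ++ (indices.drop 1).take 1)
      let c1' := n - 1
      let c0' := c0 - 1
      if c0' = 0 then
        []
      else
        let j := c0'
        let p := n - j
        let indices := (indices.set 0 (indices.getD p 0)).set p (indices.getD 0 0)
        permyYield pool indices :: permyLoop pool n indices c0' c1' fuel
    else
      let j := c1'
      let p := n - j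
      let indices := (indices.set 1 (indices.getD p 0)).set p (indices.getD 1 0)
      permyYield pool indices :: permyLoop pool n indices c0 c1' fuel


def permy (iterable : List Int) : List (List Int) :=
  let pool := iterable
  let n := pool.length
  if n < 2 then []
  else
    let indices := List.range n
    permyYield pool indices :: permyLoop pool n indices n (n - 1) (n * n)


-- ===== PORT B =====
def permy_alt (iterable : List Int) : List (List Int) :=
  let pool := iterable
  let n := pool.length
  (List.range n).flatMap (fun i =>
    (List.range n).flatMap (fun j =>
      if i ≠ j then [[pool.getD i 0, pool.getD j 0]] else []))


-- ===== PRECONDITION & SPEC =====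
def Spec_permy (iterable : List Int) (out : List (List Int)) : Prop := out = permy_alt iterable
instance (iterable : List Int) (out : List (List Int)) : Decidable (Spec_permy iterable out) := by unfold Spec_permy; infer_instance

-- ===== CLAIM (what is proved, stated in full; the proofs are below) =====
def Claim_equal_permy : Prop := ∀ (iterable : List Int), Dom_permy iterable → Spec_permy iterable (permy iterable)

-- ===== LEMMAS AND PROOFS =====

-- Abstract description of A's reachable loop states, parametrised by the pair (a, b)
-- of pool indices most recently yielded: indices = [a, b] ++ (the complement of {a, b}
-- in {0,…,n-1} in ascending order), cycles = [n - a, n - pvRank a b], where pvRank a b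
-- is the 1-based position of b in the ascending enumeration of {0,…,n-1} \ {a} and
-- pvNxt a b is the value after b in that enumeration.
def pvRest (n a b : Nat) : List Nat :=
  if b < a then
    List.range' 0 b ++ List.range' (b+1) (a-b-1) ++ List.range' (a+1) (n-1-a)
  else
    List.range' 0 a ++ List.range' (a+1) (b-a-1) ++ List.range' (b+1) (n-1-b)
def pvIdx (n a b : Nat) : List Nat := a :: b :: pvRest n a b

lemma pvIdx_length {n a b : Nat} (ha : a < n) (hb : b < n) (hab : a ≠ b) :
    (pvIdx n a b).length = n := by
  unfold pvIdx pvRest; split <;> simp <;> omega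

lemma pvIdx_get {n a b : Nat} (ha : a < n) (hb : b < n) (hab : a ≠ b)
    (k : Nat) (hk : k < (pvIdx n a b).length) :
    (pvIdx n a b)[k] =
      if k = 0 then a else if k = 1 then b
      else if k - 2 < min a b then k - 2
      else if k - 1 < max a b then k - 1 else k := by
  rw [pvIdx_length ha hb hab] at hk
  rw [List.getElem_eq_iff]
  by_cases hba : b < a
  · have hmin : min a b = b := by omega
    have hmax : max a b = a := by omega
    rw [hmin, hmax]
    unfold pvIdx pvRest
    rw [if_pos hba]
    rcases k with _ | k
    · simp
    rcases k with _ | k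
    · simp
    simp only [List.getElem?_cons_succ, List.getElem?_append, List.length_append,
      List.length_range']
    split_ifs <;>
      first
        | (rw [List.getElem?_range' (by omega)];
           simp only [Option.some.injEq, Nat.one_mul]; omega)
        | (exfalso; omega)
  · have hmin : min a b = a := by omega
    have hmax : max a b = b := by omega
    rw [hmin, hmax]
    unfold pvIdx pvRest
    rw [if_neg hba]
    rcases k with _ | k
    · simp
    rcases k with _ | k
    · simp
    simp only [List.getElem?_cons_succ, List.getElem?_append, List.length_append,
      List.length_range']
    split_ifs <;>
      first
        | (rw [List.getElem?_range' (by omega)];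
           simp only [Option.some.injEq, Nat.one_mul]; omega)
        | (exfalso; omega)

def pvRank (a b : Nat) : Nat := if b < a then b + 1 else b
def pvNxt (a b : Nat) : Nat := if b + 1 = a then b + 2 else b + 1

lemma pvNxt_bounds {n a b : Nat} (ha : a < n) (hb : b < n) (hab : a ≠ b)
    (hr : pvRank a b < n - 1) :
    pvNxt a b < n ∧ a ≠ pvNxt a b ∧ pvRank a (pvNxt a b) = pvRank a b + 1 := by
  unfold pvRank pvNxt at *; split_ifs at * <;> omega

lemma pvIdx_get1 {n a b : Nat} (ha : a < n) (hb : b < n) (hab : a ≠ b)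
    (hr : pvRank a b < n - 1) :
    (pvIdx n a b).getD (pvRank a b + 1) 0 = pvNxt a b := by
  have hlen : pvRank a b + 1 < (pvIdx n a b).length := by
    rw [pvIdx_length ha hb hab]; unfold pvRank at *; split_ifs at * <;> omega
  rw [List.getD_eq_getElem?_getD, List.getElem?_eq_getElem hlen]
  simp only [Option.getD_some]
  rw [pvIdx_get ha hb hab _ hlen]
  unfold pvRank pvNxt at *; split_ifs at * <;> omega

lemma pvIdx_swap1 {n a b : Nat} (ha : a < n) (hb : b < n) (hab : a ≠ b)
    (hr : pvRank a b < n - 1) :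
    (((pvIdx n a b).set 1 (pvNxt a b)).set (pvRank a b + 1) b) = pvIdx n a (pvNxt a b) := by
  obtain ⟨hb', hab', _⟩ := pvNxt_bounds ha hb hab hr
  apply List.ext_getElem
  · simp [List.length_set, pvIdx_length ha hb hab, pvIdx_length ha hb' hab']
  intro k h1 h2
  simp only [List.length_set, pvIdx_length ha hb hab] at h1
  have hk : k < (pvIdx n a b).length := by rw [pvIdx_length ha hb hab]; exact h1
  have hk' : k < (pvIdx n a (pvNxt a b)).length := by rw [pvIdx_length ha hb' hab']; exact h1
  simp only [List.getElem_set]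
  rw [pvIdx_get ha hb hab k hk, pvIdx_get ha hb' hab' k hk']
  unfold pvRank pvNxt at *; split_ifs at * <;> omega

def pvRot (n a : Nat) : List Nat := a :: (List.range' 0 a ++ List.range' (a+1) (n-1-a))

lemma pvRot_length {n a : Nat} (ha : a < n) : (pvRot n a).length = n := by
  simp [pvRot]; omega

lemma pvRot_get_all {n a : Nat} (ha : a < n) (k : Nat) (hk : k < (pvRot n a).length) :
    (pvRot n a)[k] = if k = 0 then a else if k - 1 < a then k - 1 else k := by
  rw [pvRot_length ha] at hk
  rw [List.getElem_eq_iff]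
  unfold pvRot
  rcases k with _ | k
  · simp
  simp only [List.getElem?_cons_succ, List.getElem?_append, List.length_range']
  split_ifs <;>
    first
      | (rw [List.getElem?_range' (by omega)];
         simp only [Option.some.injEq, Nat.one_mul]; omega)
      | (exfalso; omega)

lemma pvRot_eq {n a b : Nat} (ha : a < n) (hb : b < n) (hab : a ≠ b)
    (hr : pvRank a b = n - 1) (han : a < n - 1) :
    a :: (pvRest n a b ++ [b]) = pvRot n a := by
  have hba : ¬ b < a := by unfold pvRank at hr; split_ifs at hr <;> omega
  have hb' : b = n - 1 := by unfold pvRank at hr; split_ifs at hr <;> omega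
  unfold pvRest pvRot
  rw [if_neg hba]
  have h0 : n - 1 - b = 0 := by omega
  have h1 : n - 1 - a = (b - a - 1) + 1 := by omega
  rw [h0, h1, List.range'_concat]
  have h2 : a + 1 + 1 * (b - a - 1) = b := by omega
  rw [h2]
  simp [List.append_assoc]

lemma pvRot_get {n a : Nat} (ha : a < n) (han : a < n - 1) :
    (pvRot n a).getD (a+1) 0 = a + 1 := by
  have hlen : a + 1 < (pvRot n a).length := by rw [pvRot_length ha]; omega
  rw [List.getD_eq_getElem?_getD, List.getElem?_eq_getElem hlen]
  simp only [Option.getD_some]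
  rw [pvRot_get_all ha _ hlen]
  simp

lemma pvRot_swap {n a : Nat} (ha : a < n) (han : a < n - 1) :
    ((pvRot n a).set 0 (a+1)).set (a+1) a = pvIdx n (a+1) 0 := by
  have ha' : a + 1 < n := by omega
  have h0 : (0:Nat) < n := by omega
  have hne : a + 1 ≠ 0 := by omega
  apply List.ext_getElem
  · simp [List.length_set, pvRot_length ha, pvIdx_length ha' h0 hne]
  intro k h1 h2
  simp only [List.length_set, pvRot_length ha] at h1
  have hk : k < (pvRot n a).length := by rw [pvRot_length ha]; exact h1
  have hk' : k < (pvIdx n (a+1) 0).length := by rw [pvIdx_length ha' h0 hne]; exact h1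
  simp only [List.getElem_set]
  rw [pvRot_get_all ha k hk, pvIdx_get ha' h0 hne k hk']
  split_ifs at * <;> omega

lemma range'_uncons {s m : Nat} (hm : 1 ≤ m) :
    List.range' s m = s :: List.range' (s+1) (m-1) := by
  obtain ⟨m', rfl⟩ : ∃ m', m = m' + 1 := ⟨m - 1, by omega⟩
  simp [List.range'_succ]

def pvInner (n a b : Nat) : List Nat :=
  if b < a then List.range' (b+1) (a-b-1) ++ List.range' (a+1) (n-1-a)
  else List.range' (b+1) (n-1-b)

lemma pvInner_last {n a b : Nat} (ha : a < n) (hb : b < n) (hab : a ≠ b)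
    (hr : pvRank a b = n - 1) : pvInner n a b = [] := by
  unfold pvRank pvInner at *; split_ifs at * <;> simp <;> omega

lemma range'_congr {s s' m m' : Nat} (hs : s = s') (hm : m = m') :
    List.range' s m = List.range' s' m' := by rw [hs, hm]

lemma pvInner_step {n a b : Nat} (ha : a < n) (hb : b < n) (hab : a ≠ b)
    (hr : pvRank a b < n - 1) :
    pvInner n a b = pvNxt a b :: pvInner n a (pvNxt a b) := by
  unfold pvRank pvInner pvNxt at *
  by_cases h1 : b + 1 = a
  · rw [if_pos h1]
    subst h1
    rw [if_pos (show b < b + 1 from by omega)] at hr ⊢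
    rw [show b + 1 - b - 1 = 0 from by omega]
    simp only [List.range'_zero, List.nil_append]
    rw [if_neg (show ¬ b + 2 < b + 1 from by omega)]
    rw [range'_uncons (show 1 ≤ n - 1 - (b + 1) from by omega)]
    exact congrArg₂ (· :: ·) (show b + 1 + 1 = b + 2 from by omega)
      (range'_congr (show b + 1 + 1 + 1 = b + 2 + 1 from by omega)
        (show n - 1 - (b + 1) - 1 = n - 1 - (b + 2) from by omega))
  · rw [if_neg h1]
    by_cases h2 : b < a
    · rw [if_pos h2] at hr ⊢
      rw [if_pos (show b + 1 < a from by omega)]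
      rw [range'_uncons (show 1 ≤ a - b - 1 from by omega)]
      simp only [List.cons_append, List.cons.injEq, true_and]
      exact congrArg₂ (· ++ ·)
        (range'_congr rfl (show a - b - 1 - 1 = a - (b + 1) - 1 from by omega)) rfl
    · rw [if_neg h2] at hr ⊢
      rw [if_neg (show ¬ b + 1 < a from by omega)]
      rw [range'_uncons (show 1 ≤ n - 1 - b from by omega)]
      exact congrArg₂ (· :: ·) rfl
        (range'_congr rfl (show n - 1 - b - 1 = n - 1 - (b + 1) from by omega))

def pvRow (pool : List Int) (n i : Nat) : List (List Int) :=
  (List.range' 0 i ++ List.range' (i+1) (n-1-i)).map (fun j => [pool.getD i 0, pool.getD j 0])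
def pvTail (pool : List Int) (n a b : Nat) : List (List Int) :=
  (pvInner n a b).map (fun j => [pool.getD a 0, pool.getD j 0])
  ++ (List.range' (a+1) (n-1-a)).flatMap (fun i => pvRow pool n i)

lemma pvTail_inner (pool : List Int) {n a b : Nat} (ha : a < n) (hb : b < n) (hab : a ≠ b)
    (hr : pvRank a b < n - 1) :
    pvTail pool n a b
      = [pool.getD a 0, pool.getD (pvNxt a b) 0] :: pvTail pool n a (pvNxt a b) := by
  unfold pvTail
  rw [pvInner_step ha hb hab hr]
  simp [List.cons_append]

lemma pvTail_outer (pool : List Int) {n a b : Nat} (ha : a < n) (hb : b < n) (hab : a ≠ b)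
    (hr : pvRank a b = n - 1) (han : a < n - 1) :
    pvTail pool n a b = [pool.getD (a+1) 0, pool.getD 0 0] :: pvTail pool n (a+1) 0 := by
  unfold pvTail
  rw [pvInner_last ha hb hab hr]
  rw [range'_uncons (show 1 ≤ n - 1 - a from by omega)]
  rw [List.flatMap_cons]
  have hrow : pvRow pool n (a+1)
      = [pool.getD (a+1) 0, pool.getD 0 0] :: (pvInner n (a+1) 0).map
          (fun j => [pool.getD (a+1) 0, pool.getD j 0]) := by
    unfold pvRow pvInner
    rw [if_pos (show 0 < a + 1 from by omega)]
    rw [range'_uncons (show 1 ≤ a + 1 from by omega)]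
    simp only [List.cons_append, List.map_cons, List.map_append, List.cons.injEq, true_and]
    rw [show a + 1 - 1 = a + 1 - 0 - 1 from by omega]
  rw [hrow]
  simp only [List.cons_append]
  congr 2 <;> omega

lemma permyYield_idx (pool : List Int) (n a b : Nat) :
    permyYield pool (pvIdx n a b) = [pool.getD a 0, pool.getD b 0] := by
  simp [permyYield, pvIdx]

lemma pvRank_bounds {n a b : Nat} (ha : a < n) (hb : b < n) (hab : a ≠ b) :
    1 ≤ pvRank a b ∧ pvRank a b ≤ n - 1 := by
  unfold pvRank; split <;> omega

lemma loop_eq (pool : List Int) (n : Nat) (fuel : Nat) :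
    ∀ a b : Nat, a < n → b < n → a ≠ b →
    (n-1-a) * (n-1) + (n-1 - pvRank a b) + 1 ≤ fuel →
    permyLoop pool n (pvIdx n a b) (n - a) (n - pvRank a b) fuel = pvTail pool n a b := by
  induction fuel with
  | zero => intro a b _ _ _ hf; omega
  | succ fuel ih =>
    intro a b ha hb hab hf
    have hrk := pvRank_bounds ha hb hab
    simp only [permyLoop]
    by_cases hlast : pvRank a b = n - 1
    · rw [if_pos (show n - pvRank a b - 1 = 0 from by omega)]
      have hrot : (pvIdx n a b).take 1 ++ ((pvIdx n a b).drop 2 ++ ((pvIdx n a b).drop 1).take 1)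
          = a :: (pvRest n a b ++ [b]) := by
        simp [pvIdx]
      by_cases halast : a = n - 1
      · rw [if_pos (show n - a - 1 = 0 from by omega)]
        unfold pvTail
        rw [pvInner_last ha hb hab hlast]
        rw [show n - 1 - a = 0 from by omega]
        simp
      · rw [if_neg (show ¬ n - a - 1 = 0 from by omega)]
        rw [hrot, pvRot_eq ha hb hab hlast (by omega)]
        rw [show n - (n - a - 1) = a + 1 from by omega]
        rw [pvRot_get ha (by omega)]
        rw [show (pvRot n a).getD 0 0 = a from rfl]
        rw [pvRot_swap ha (by omega)]
        rw [permyYield_idx]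
        have hmul : (n-1-a) * (n-1) = (n-1-(a+1)) * (n-1) + (n-1) := by
          rw [show n-1-a = (n-1-(a+1)) + 1 from by omega]; ring
        have harg1 : n - a - 1 = n - (a + 1) := by omega
        have harg2 : n - 1 = n - pvRank (a+1) 0 := by
          unfold pvRank; rw [if_pos (show 0 < a + 1 from by omega)]
        rw [harg1, harg2]
        have hp1 : pvRank (a+1) 0 = 1 := by
          unfold pvRank; rw [if_pos (show 0 < a + 1 from by omega)]
        rw [ih (a+1) 0 (by omega) (by omega) (by omega) (by rw [hp1]; omega)]
        rw [pvTail_outer pool ha hb hab hlast (by omega)]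
    · rw [if_neg (show ¬ n - pvRank a b - 1 = 0 from by omega)]
      rw [show n - (n - pvRank a b - 1) = pvRank a b + 1 from by omega]
      rw [pvIdx_get1 ha hb hab (by omega)]
      rw [show (pvIdx n a b).getD 1 0 = b from rfl]
      rw [pvIdx_swap1 ha hb hab (by omega)]
      rw [permyYield_idx]
      obtain ⟨hb', hab', hr'⟩ := pvNxt_bounds ha hb hab (by omega)
      have harg : n - pvRank a b - 1 = n - pvRank a (pvNxt a b) := by omega
      rw [harg]
      rw [ih a (pvNxt a b) ha hb' hab' (by rw [hr']; omega)]
      rw [pvTail_inner pool ha hb hab (by omega)]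

lemma flatMap_if_not_mem {α : Type} (i : Nat) (g : Nat → α) :
    ∀ l : List Nat, (∀ j ∈ l, j ≠ i) →
      (l.flatMap (fun j => if i ≠ j then [g j] else [])) = l.map g := by
  intro l
  induction l with
  | nil => intro _; rfl
  | cons x xs ih =>
    intro h
    have hx : i ≠ x := fun he => (h x (by simp)) he.symm
    have ih' := ih (fun j hj => h j (by simp [hj]))
    simp only [ne_eq, ite_not] at ih' ⊢
    simp [List.flatMap_cons, hx, ih']

lemma pvFlatMap_congr {α β : Type} (l : List α) (f g : α → List β)
    (h : ∀ x ∈ l, f x = g x) : l.flatMap f = l.flatMap g := by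
  induction l with
  | nil => rfl
  | cons x xs ih =>
    simp only [List.flatMap_cons]
    rw [h x (by simp), ih (fun y hy => h y (by simp [hy]))]

lemma row_alt (pool : List Int) (n i : Nat) (hi : i < n) :
    ((List.range n).flatMap (fun j =>
        if i ≠ j then [[pool.getD i 0, pool.getD j 0]] else []))
      = pvRow pool n i := by
  unfold pvRow
  rw [List.range_eq_range']
  rw [show n = i + (1 + (n - 1 - i)) from by omega, ← List.range'_append]
  rw [show List.range' (0 + 1 * i) (1 + (n - 1 - i)) = i :: List.range' (i + 1) (n - 1 - i) from by
    rw [range'_uncons (by omega)]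
    exact congrArg₂ (· :: ·) (by omega) (range'_congr (by omega) (by omega))]
  rw [List.flatMap_append, List.flatMap_cons, List.map_append]
  rw [if_neg (show ¬ i ≠ i from by simp)]
  rw [flatMap_if_not_mem i _ _ (by intro j hj; rw [List.mem_range'_1] at hj; omega)]
  rw [flatMap_if_not_mem i _ _ (by intro j hj; rw [List.mem_range'_1] at hj; omega)]
  simp only [List.nil_append]
  exact congrArg₂ (· ++ ·) rfl
    (congrArg (List.map (fun j => [pool.getD i 0, pool.getD j 0]))
      (range'_congr rfl (show n - 1 - i = i + (1 + (n - 1 - i)) - 1 - i from by omega)))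

lemma range_eq_pvIdx {n : Nat} (hn : 2 ≤ n) : List.range n = pvIdx n 0 1 := by
  unfold pvIdx pvRest
  rw [if_neg (by omega)]
  simp only [Nat.sub_zero, List.range'_zero]
  rw [show (1:Nat) - 0 - 1 = 0 from by omega]
  simp only [List.range'_zero, List.nil_append]
  rw [List.range_eq_range']
  rw [range'_uncons (show 1 ≤ n from by omega)]
  rw [range'_uncons (show 1 ≤ n - 1 from by omega)]

lemma permy_alt_eq (pool : List Int) (hn : 2 ≤ pool.length) :
    permy_alt pool
      = [pool.getD 0 0, pool.getD 1 0] :: pvTail pool pool.length 0 1 := by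
  simp only [permy_alt]
  rw [pvFlatMap_congr _ _ (fun i => pvRow pool pool.length i)
    (fun i hi => row_alt pool pool.length i (by rw [List.mem_range] at hi; exact hi))]
  unfold pvTail
  rw [List.range_eq_range']
  rw [range'_uncons (show 1 ≤ pool.length from by omega)]
  rw [List.flatMap_cons]
  have hrow0 : pvRow pool pool.length 0
      = [pool.getD 0 0, pool.getD 1 0] ::
          (pvInner pool.length 0 1).map (fun j => [pool.getD 0 0, pool.getD j 0]) := by
    unfold pvRow pvInner
    rw [if_neg (show ¬ (1:Nat) < 0 from by omega)]
    simp only [List.range'_zero, List.nil_append, Nat.sub_zero]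
    rw [range'_uncons (show 1 ≤ pool.length - 1 from by omega)]
    simp
  rw [hrow0, List.cons_append]
  congr 2


theorem permy_eq (iterable : List Int) : permy iterable = permy_alt iterable := by
  by_cases hn : iterable.length < 2
  · simp only [permy, if_pos hn]
    rcases iterable with _ | ⟨x, _ | ⟨y, t⟩⟩
    · rfl
    · simp [permy_alt, List.range_succ]
    · simp at hn
  · have h2 : 2 ≤ iterable.length := by omega
    simp only [permy, if_neg hn]
    rw [range_eq_pvIdx h2, permyYield_idx]
    obtain ⟨m, hm⟩ : ∃ m, iterable.length = m + 2 := ⟨iterable.length - 2, by omega⟩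
    have hfuel : (iterable.length - 1 - 0) * (iterable.length - 1)
        + (iterable.length - 1 - pvRank 0 1) + 1
        ≤ iterable.length * iterable.length := by
      rw [show pvRank 0 1 = 1 from rfl, hm]
      rw [show m + 2 - 1 = m + 1 from rfl]
      simp only [Nat.sub_zero]
      rw [show m + 1 - 1 = m from rfl]
      nlinarith
    have hl := loop_eq iterable iterable.length (iterable.length * iterable.length)
      0 1 (by omega) (by omega) (by omega) hfuel
    rw [show pvRank 0 1 = 1 from rfl] at hl
    simp only [Nat.sub_zero] at hl
    rw [hl]
    rw [permy_alt_eq iterable h2]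

-- ===== VERDICT (by name: the statement is the Claim_ definition above) =====
theorem permy_spec : Claim_equal_permy := by
  intro iterable _
  unfold Spec_permy
  exact permy_eq iterable
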